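-- pv_equiv track=rewrite | github.com/chrisgleitze/hegel.nvim | scripts/parse_ocr.py | detect_anmerkung
-- ===== SOURCE A (Python) =====
-- def detect_anmerkung(text_lines):
--     """Split paragraph text into main § text and Anmerkung.
--
--     In Hegel's Rechtsphilosophie, each § consists of:
--     1. The paragraph text (often a single dense sentence)
--     2. An Anmerkung (remark) — Hegel's own elaboration
--
--     The first text block (before the first blank line) is the § text.
--     Everything after is the Anmerkung.
--     """
--     par_text = []
--     anm_text = []
--     first_block_done = False
--
--     for line in text_lines:
--         if line == '' and not first_block_done:
--             first_block_done = True
--             continue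
--         if first_block_done:
--             anm_text.append(line)
--         else:
--             par_text.append(line)
--
--     # Clean up Anmerkung
--     while anm_text and anm_text[0] == '':
--         anm_text.pop(0)
--     while anm_text and anm_text[-1] == '':
--         anm_text.pop()
--
--     return par_text, anm_text
-- ===== SOURCE B (Python) =====
-- def _strip_leading(xs):
--     """Return xs without its leading empty strings (pure, slice-based)."""
--     n = 0
--     while n < len(xs) and xs[n] == '':
--         n += 1
--     return xs[n:]
--
--
-- def detect_anmerkung(text_lines):
--     lines = list(text_lines)
--     if '' in lines:
--         i = lines.index('')
--         par_text, anm_text = lines[:i], lines[i + 1:]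
--     else:
--         par_text, anm_text = lines, []
--     anm_text = _strip_leading(anm_text)
--     anm_text = _strip_leading(anm_text[::-1])[::-1]
--     return par_text, anm_text
-- ===== Notes on version B (the rewrite author's own statement) =====
-- stated objective: simpler
-- what changed: Replaces the boolean-flag single-pass accumulation and the two destructive pop-loops with a find-the-first-blank-then-slice decomposition plus a pure slice-based strip of blank lines at both ends.
import Mathlib
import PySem

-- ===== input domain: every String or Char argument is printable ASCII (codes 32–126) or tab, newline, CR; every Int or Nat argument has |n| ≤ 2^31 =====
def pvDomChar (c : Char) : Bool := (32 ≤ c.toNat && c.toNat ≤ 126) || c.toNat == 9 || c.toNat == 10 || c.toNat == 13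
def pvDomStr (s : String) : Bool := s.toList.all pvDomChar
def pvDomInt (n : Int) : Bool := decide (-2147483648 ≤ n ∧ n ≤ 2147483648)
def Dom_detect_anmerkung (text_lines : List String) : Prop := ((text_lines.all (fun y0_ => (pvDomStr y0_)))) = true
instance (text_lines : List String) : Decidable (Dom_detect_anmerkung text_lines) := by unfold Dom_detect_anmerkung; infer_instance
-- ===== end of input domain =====

-- B replaces A's boolean-flag single pass and its two pop-loops by a
-- find-first-blank-then-slice decomposition with pure slice-based trimming (objective: simpler).

-- ===== PORT A =====
-- one iteration of A's for-loop over state (par_text, anm_text, first_block_done)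
def pvLoopA (acc : List String × List String × Bool) (line : String) :
    List String × List String × Bool :=
  if line = "" ∧ acc.2.2 = false then (acc.1, acc.2.1, true)
  else if acc.2.2 then (acc.1, acc.2.1 ++ [line], acc.2.2)
  else (acc.1 ++ [line], acc.2.1, acc.2.2)

-- `while anm_text and anm_text[0] == '': anm_text.pop(0)`
def pvTrimFrontA : List String → List String
  | [] => []
  | x :: xs => if x = "" then pvTrimFrontA xs else x :: xs

-- `while anm_text and anm_text[-1] == '': anm_text.pop()`
def pvTrimBackA (l : List String) : List String :=
  match h : l.getLast? with
  | some s => if s = "" then pvTrimBackA l.dropLast else l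
  | none => l
termination_by l.length
decreasing_by
  have hne : l ≠ [] := by intro hl; subst hl; simp at h
  have : 0 < l.length := List.length_pos_of_ne_nil hne
  simp [List.length_dropLast]; omega

def detect_anmerkung (text_lines : List String) : List String × List String :=
  let r := text_lines.foldl pvLoopA ([], [], false)
  (r.1, pvTrimBackA (pvTrimFrontA r.2.1))

-- ===== PORT B =====
-- _strip_leading: count the leading '' by an index loop, then slice xs[n:] (= drop n, exact: 0 ≤ n ≤ len)
def pvStripCount : List String → Nat
  | [] => 0
  | x :: xs => if x = "" then pvStripCount xs + 1 else 0

def pvStripLeading (xs : List String) : List String := xs.drop (pvStripCount xs)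

def detect_anmerkung_alt (text_lines : List String) : List String × List String :=
  -- `'' in lines` + `lines.index('')` ported together as index? (some ↔ membership);
  -- lines[:i] / lines[i+1:] with i the first index of '' are take i / drop (i+1) (exact, i in range)
  let pa : List String × List String :=
    match PySem.List.index? text_lines "" with
    | some i => (text_lines.take i, text_lines.drop (i + 1))
    | none => (text_lines, [])
  let anm := pvStripLeading pa.2
  let anm := (pvStripLeading anm.reverse).reverse   -- xs[::-1] = reverse
  (pa.1, anm)

-- ===== PRECONDITION & SPEC =====
def Spec_detect_anmerkung (text_lines : List String) (out : List String × List String) : Prop := out = detect_anmerkung_alt text_lines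
instance (text_lines : List String) (out : List String × List String) : Decidable (Spec_detect_anmerkung text_lines out) := by unfold Spec_detect_anmerkung; infer_instance

-- ===== CLAIM (what is proved, stated in full; the proofs are below) =====
def Claim_equal_detect_anmerkung : Prop := ∀ (text_lines : List String), Dom_detect_anmerkung text_lines → Spec_detect_anmerkung text_lines (detect_anmerkung text_lines)

-- ===== LEMMAS AND PROOFS =====

theorem stripLeading_eq_dropWhile (xs : List String) :
    pvStripLeading xs = xs.dropWhile (fun x => x == "") := by
  induction xs with
  | nil => rfl
  | cons x xs ih =>
    by_cases hx : x = "" <;>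
      simp [pvStripLeading, pvStripCount, hx] at ih ⊢ <;>
      simpa [pvStripLeading] using ih

theorem trimFront_eq_dropWhile (l : List String) :
    pvTrimFrontA l = l.dropWhile (fun x => x == "") := by
  induction l with
  | nil => rfl
  | cons x xs ih =>
    by_cases hx : x = "" <;> simp [pvTrimFrontA, hx, ih]

theorem trimBack_concat (xs : List String) (x : String) :
    pvTrimBackA (xs ++ [x]) = if x = "" then pvTrimBackA xs else xs ++ [x] := by
  rw [pvTrimBackA]
  split
  · rename_i s h
    rw [List.getLast?_concat] at h
    simp only [Option.some.injEq] at h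
    subst h
    simp
  · rename_i h
    rw [List.getLast?_concat] at h
    simp at h

theorem trimBack_eq (l : List String) :
    pvTrimBackA l = (l.reverse.dropWhile (fun x => x == "")).reverse := by
  induction l using List.reverseRecOn with
  | nil => rw [pvTrimBackA]; rfl
  | append_singleton xs x ih =>
    rw [trimBack_concat]
    by_cases hx : x = "" <;> simp [hx, ih]

theorem foldl_done (xs : List String) (p a : List String) :
    xs.foldl pvLoopA (p, a, true) = (p, a ++ xs, true) := by
  induction xs generalizing a with
  | nil => simp
  | cons x xs ih => simp [pvLoopA, ih]

theorem foldl_no_blank (xs : List String) (p a : List String) (h : "" ∉ xs) :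
    xs.foldl pvLoopA (p, a, false) = (p ++ xs, a, false) := by
  induction xs generalizing p with
  | nil => simp
  | cons x xs ih =>
    have hx : x ≠ "" := by intro hx; exact h (hx ▸ List.mem_cons_self)
    have hxs : "" ∉ xs := fun hm => h (List.mem_cons_of_mem _ hm)
    simp [pvLoopA, hx, ih _ hxs]

theorem foldl_blank (xs : List String) (p a : List String) (h : "" ∈ xs) :
    xs.foldl pvLoopA (p, a, false) =
      (p ++ xs.take (xs.idxOf ""), a ++ xs.drop (xs.idxOf "" + 1), true) := by
  induction xs generalizing p with
  | nil => simp at h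
  | cons x xs ih =>
    by_cases hx : x = ""
    · subst hx
      simp [pvLoopA, List.idxOf_cons_self, foldl_done]
    · have hxs : "" ∈ xs := by
        rcases List.mem_cons.mp h with h' | h'
        · exact absurd h'.symm hx
        · exact h'
      have hb : (x == "") = false := by simp [hx]
      simp [pvLoopA, hx, ih _ hxs, List.append_assoc]

theorem index?_of_mem (l : List String) (h : "" ∈ l) :
    PySem.List.index? l "" = some (l.idxOf "") := by
  induction l with
  | nil => simp at h
  | cons x xs ih =>
    by_cases hx : x = ""
    · subst hx
      rw [PySem.List.index?_cons_self]
      simp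
    · have hxs : "" ∈ xs := by
        rcases List.mem_cons.mp h with h' | h'
        · exact absurd h'.symm hx
        · exact h'
      have hb : (x == "") = false := by simp [hx]
      rw [PySem.List.index?_cons_of_ne xs hx, ih hxs]
      simp [List.idxOf_cons, hb]

-- ===== VERDICT (by name: the statement is the Claim_ definition above) =====
theorem detect_anmerkung_spec : Claim_equal_detect_anmerkung := by
  intro text_lines _
  unfold Spec_detect_anmerkung detect_anmerkung detect_anmerkung_alt
  by_cases hm : "" ∈ text_lines
  · rw [index?_of_mem _ hm]
    have := foldl_blank text_lines [] [] hm
    simp only [List.nil_append] at this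
    simp [this, trimBack_eq, trimFront_eq_dropWhile, stripLeading_eq_dropWhile]
  · rw [(PySem.List.index?_eq_none_iff text_lines "").mpr hm]
    have := foldl_no_blank text_lines [] [] hm
    simp only [List.nil_append] at this
    simp [this, trimBack_eq, trimFront_eq_dropWhile, stripLeading_eq_dropWhile]
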